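-- pv_equiv track=rewrite | github.com/sunjianbo945/leetcode | src/data_structure/search/toplogical_sort_dfs_bfs.py | canVisitAllRooms_dfs
-- ===== SOURCE A (Python) =====
-- from collections import deque, defaultdict, Counter
-- from typing import List
--
-- def canVisitAllRooms_dfs(rooms: List[List[int]]) -> bool:
--     graph = defaultdict(list)
--     m, n = len(rooms), len(rooms[0])
--     for room in range(m):
--         keys = rooms[room]
--         graph[room].extend(keys)
--
--     seen = set()
--
--     def dfs(room):
--         if room in seen: return
--
--         seen.add(room)
--         for neighbor in graph[room]:
--             dfs(neighbor)
--
--     dfs(0)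
--     return len(seen) == m
-- ===== SOURCE B (Python) =====
-- from collections import deque
--
-- def canVisitAllRooms_dfs(rooms):
--     graph = {room: keys for room, keys in enumerate(rooms)}
--     seen = {0}
--     queue = deque([0])
--     while queue:
--         room = queue.popleft()
--         for key in graph.get(room, []):
--             if key not in seen:
--                 seen.add(key)
--                 queue.append(key)
--     return len(seen) == len(rooms)
-- ===== Notes on version B (the rewrite author's own statement) =====
-- stated objective: alternative
-- what changed: Replaced the recursive closure-based DFS (defaultdict graph + nested recursive dfs marking rooms on visit) by an iterative BFS: a plain dict built by comprehension, a deque seeded with 0, and mark-before-enqueue; Pre_ excludes only rooms = [], on which A raises IndexError at len(rooms[0]).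
-- outside the precondition, e.g. on canVisitAllRooms_dfs([]): A raises IndexError, B returns False
import Mathlib
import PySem

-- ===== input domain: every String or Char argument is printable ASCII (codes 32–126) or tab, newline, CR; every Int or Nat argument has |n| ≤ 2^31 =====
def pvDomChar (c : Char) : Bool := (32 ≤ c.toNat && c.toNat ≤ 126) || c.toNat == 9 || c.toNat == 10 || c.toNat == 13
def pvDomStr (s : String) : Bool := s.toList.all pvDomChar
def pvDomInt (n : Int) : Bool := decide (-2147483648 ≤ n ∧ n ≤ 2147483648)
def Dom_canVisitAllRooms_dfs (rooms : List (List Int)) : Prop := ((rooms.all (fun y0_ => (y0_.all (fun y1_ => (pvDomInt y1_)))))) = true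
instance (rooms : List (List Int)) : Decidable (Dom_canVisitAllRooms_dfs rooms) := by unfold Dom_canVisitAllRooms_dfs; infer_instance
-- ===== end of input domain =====

-- B replaces A's recursive defaultdict-graph DFS by an iterative BFS over a plain dict (deque + mark-before-enqueue); Pre_ excludes only rooms = [], where A raises IndexError and B returns False.


-- ===== PORT A =====
-- 'def dfs(room)' of A; the recursion depth of Python's dfs is bounded by the number of
-- distinct visitable values, so the port carries a fuel argument that the caller sets
-- large enough (proved sufficient below); fuel 0 is never reached for that value.
def dfsA (g : PySem.Dict Int (List Int)) : Nat → PySem.Set Int → Int → PySem.Set Int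
  | 0, seen, _ => seen
  | fuel+1, seen, room =>
    if PySem.Set.contains seen room then seen
    else (g.getD room []).foldl (fun s n => dfsA g fuel s n) (PySem.Set.add seen room)

-- 'graph = defaultdict(list); for room in range(m): graph[room].extend(rooms[room])'
def buildGraphA (rooms : List (List Int)) : PySem.Dict Int (List Int) :=
  (PySem.List.pyRange 0 (rooms.length : Int) 1).foldl
    (fun g room => g.insert room (g.getD room [] ++ PySem.List.pyGetD rooms room []))
    PySem.Dict.empty

def canVisitAllRooms_dfs (rooms : List (List Int)) : Bool :=
  match PySem.List.pyGet? rooms 0 with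
  | none => false   -- Python raises IndexError at 'len(rooms[0])'; excluded by Pre_
  | some _ =>
    let m : Int := rooms.length
    let g := buildGraphA rooms
    let seen := dfsA g (rooms.flatten.length + 2) PySem.Set.empty 0
    PySem.Set.len seen == m

-- ===== PORT B =====
-- 'graph = {room: keys for room, keys in enumerate(rooms)}'
def graphB (rooms : List (List Int)) : PySem.Dict Int (List Int) :=
  (PySem.List.enumerate rooms).foldl (fun g p => g.insert p.1 p.2) PySem.Dict.empty

-- one step of 'for key in graph.get(room, []): if key not in seen: seen.add(key); queue.append(key)'
def bfsKey (p : PySem.Set Int × List Int) (key : Int) : PySem.Set Int × List Int :=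
  if PySem.Set.contains p.1 key then p else (PySem.Set.add p.1 key, p.2 ++ [key])

theorem bfsKey_pos (s : PySem.Set Int) (q : List Int) (a : Int) (h : a ∈ s) :
    bfsKey (s, q) a = (s, q) := by simp [bfsKey, h]

theorem bfsKey_neg (s : PySem.Set Int) (q : List Int) (a : Int) (h : a ∉ s) :
    bfsKey (s, q) a = (PySem.Set.add s a, q ++ [a]) := by simp [bfsKey, h]

-- the finite universe every traversal stays inside (used for B's termination measure and the proofs)
def UnivF (rooms : List (List Int)) : Finset Int := insert 0 rooms.flatten.toFinset

noncomputable def phiQ (rooms : List (List Int)) (seen : PySem.Set Int) (queue : List Int) : Nat :=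
  queue.length + (UnivF rooms \ seen.toFinset).card

theorem bfsKey_phi (rooms : List (List Int)) :
    ∀ (keys : List Int), (∀ k ∈ keys, k ∈ UnivF rooms) →
      ∀ (s : PySem.Set Int) (q : List Int),
        (keys.foldl bfsKey (s, q)).2.length
            + (UnivF rooms \ (keys.foldl bfsKey (s, q)).1.toFinset).card
          ≤ q.length + (UnivF rooms \ s.toFinset).card := by
  intro keys
  induction keys with
  | nil => intro _ s q; simp
  | cons a t ih =>
    intro hu s q
    simp only [List.foldl_cons]
    by_cases hc : a ∈ s
    · rw [bfsKey_pos s q a hc]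
      exact ih (fun k hk => hu k (List.mem_cons_of_mem a hk)) s q
    · rw [bfsKey_neg s q a hc]
      have hna : a ∉ s := hc
      have hadd : PySem.Set.add s a = s ++ [a] := PySem.Set.add_of_not_mem hna
      have hfin : (PySem.Set.add s a).toFinset = insert a s.toFinset := by
        rw [hadd]; simp [List.toFinset_append]
      have hmem : a ∈ UnivF rooms \ s.toFinset := by
        simp [Finset.mem_sdiff, hu a List.mem_cons_self, List.mem_toFinset, hna]
      have hcard : (UnivF rooms \ (PySem.Set.add s a).toFinset).card
          = (UnivF rooms \ s.toFinset).card - 1 := by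
        rw [hfin, Finset.sdiff_insert, Finset.card_erase_of_mem hmem]
      have hpos : 0 < (UnivF rooms \ s.toFinset).card := Finset.card_pos.mpr ⟨a, hmem⟩
      have := ih (fun k hk => hu k (List.mem_cons_of_mem a hk)) (PySem.Set.add s a) (q ++ [a])
      simp only [List.length_append, List.length_cons, List.length_nil] at this ⊢
      omega

-- nbr is proved below to be both graphs' lookup; stated here because B's termination cites it
def nbr (rooms : List (List Int)) (r : Int) : List Int :=
  if 0 ≤ r ∧ r < (rooms.length : Int) then rooms.getD r.toNat [] else []

theorem nbr_subset_univ (rooms : List (List Int)) (r x : Int) (hx : x ∈ nbr rooms r) :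
    x ∈ UnivF rooms := by
  unfold nbr at hx
  split at hx
  · rename_i hv
    have hlt : r.toNat < rooms.length := by omega
    have : rooms.getD r.toNat [] = rooms[r.toNat] := List.getD_eq_getElem rooms [] hlt
    rw [this] at hx
    have : x ∈ rooms.flatten := List.mem_flatten.mpr ⟨rooms[r.toNat], List.getElem_mem hlt, hx⟩
    simp [UnivF, List.mem_toFinset, this]
  · simp at hx

-- 'graph.get(room, [])' looks up to nbr (B's termination cites this, so it stays above the loop)
theorem graphB_getD (rooms : List (List Int)) (r : Int) :
    (graphB rooms).getD r [] = nbr rooms r := by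
  have hplt := PySem.List.pairwise_lt_enumerate rooms (0 : Int)
  have hkeysN : ((PySem.List.enumerate rooms (0 : Int)).map (·.1)).Nodup := by
    have h1 : ((PySem.List.enumerate rooms (0 : Int)).map (·.1)).Pairwise (· < ·) :=
      List.pairwise_map.mpr hplt
    exact h1.imp (fun h => ne_of_lt h)
  have hitems : (graphB rooms).items = PySem.List.enumerate rooms (0 : Int) := by
    have := PySem.Dict.items_foldl_insert_fresh (PySem.List.enumerate rooms (0 : Int))
      (·.1) (·.2) PySem.Dict.empty (fun a _ => by simp) hkeysN
    simpa using this
  have hkeys : (graphB rooms).keys = (PySem.List.enumerate rooms (0 : Int)).map (·.1) := by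
    show (graphB rooms).items.map (·.1) = _
    rw [hitems]
  rw [PySem.Dict.getD_eq_get?_getD]
  by_cases hv : 0 ≤ r ∧ r < (rooms.length : Int)
  · have hlt : r.toNat < rooms.length := by omega
    have hmem : (r, rooms[r.toNat]) ∈ (graphB rooms).items := by
      rw [hitems, PySem.List.mem_enumerate_iff]
      exact ⟨r.toNat, hlt, by simp [Int.toNat_of_nonneg hv.1]⟩
    have hget : (graphB rooms).get? r = some rooms[r.toNat] :=
      PySem.Dict.get?_of_mem_items _ hmem (by rw [hkeys]; exact hkeysN)
    rw [hget]
    unfold nbr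
    rw [if_pos hv]
    simp [List.getElem?_eq_getElem hlt]
  · have hget : (graphB rooms).get? r = none := by
      rw [PySem.Dict.get?_eq_none_iff_not_mem_keys, hkeys]
      intro hm
      rcases List.mem_map.mp hm with ⟨p, hp, hfst⟩
      rcases (PySem.List.mem_enumerate_iff _ _ p).mp hp with ⟨k, hk, rfl⟩
      simp at hfst
      omega
    rw [hget]
    unfold nbr
    rw [if_neg hv]
    rfl

-- 'while queue: room = queue.popleft(); for key in graph.get(room, []): …'
def bfsLoop (rooms : List (List Int)) (seen : PySem.Set Int) (queue : List Int) : PySem.Set Int :=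
  match queue with
  | [] => seen
  | room :: rest =>
    bfsLoop rooms (((graphB rooms).getD room []).foldl bfsKey (seen, rest)).1
      (((graphB rooms).getD room []).foldl bfsKey (seen, rest)).2
termination_by phiQ rooms seen queue
decreasing_by
  have hb := bfsKey_phi rooms ((graphB rooms).getD room [])
    (fun k hk => nbr_subset_univ rooms room k (by rwa [graphB_getD rooms room] at hk))
    seen rest
  simp only [phiQ, List.length_cons]
  omega

-- 'seen = {0}; queue = deque([0]); …; return len(seen) == len(rooms)'
def canVisitAllRooms_dfs_alt (rooms : List (List Int)) : Bool :=
  PySem.Set.len (bfsLoop rooms (PySem.Set.ofList [0]) [0]) == (rooms.length : Int)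

-- ===== PRECONDITION & SPEC =====
-- Pre_ excludes exactly rooms = [], on which Python A raises IndexError at 'len(rooms[0])'.
def Pre_canVisitAllRooms_dfs (rooms : List (List Int)) : Prop := rooms ≠ []
instance (rooms : List (List Int)) : Decidable (Pre_canVisitAllRooms_dfs rooms) := by
  unfold Pre_canVisitAllRooms_dfs; infer_instance
def pvWitness_canVisitAllRooms_dfs : List (List Int) := [[1], [0]]

def Spec_canVisitAllRooms_dfs (rooms : List (List Int)) (out : Bool) : Prop :=
  out = canVisitAllRooms_dfs_alt rooms
instance (rooms : List (List Int)) (out : Bool) : Decidable (Spec_canVisitAllRooms_dfs rooms out) := by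
  unfold Spec_canVisitAllRooms_dfs; infer_instance

-- ===== CLAIM (what is proved, stated in full; the proofs are below) =====
def Claim_equal_canVisitAllRooms_dfs : Prop :=
  ∀ (rooms : List (List Int)), Dom_canVisitAllRooms_dfs rooms →
    Pre_canVisitAllRooms_dfs rooms →
    Spec_canVisitAllRooms_dfs rooms (canVisitAllRooms_dfs rooms)

-- ===== LEMMAS AND PROOFS =====

-- reachability along a neighbour function
inductive Reach (f : Int → List Int) : Int → Int → Prop
  | refl (a : Int) : Reach f a a
  | tail {a b c : Int} : Reach f a b → c ∈ f b → Reach f a c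

theorem Reach.head {f : Int → List Int} {a n x : Int} (hn : n ∈ f a) (h : Reach f n x) :
    Reach f a x := by
  induction h with
  | refl => exact Reach.tail (Reach.refl a) hn
  | tail _ hm ih => exact Reach.tail ih hm

-- a set containing a and closed under f contains everything f-reachable from a
theorem reach_subset_closed {f : Int → List Int} {S : List Int} {a x : Int}
    (ha : a ∈ S) (hc : ∀ r ∈ S, ∀ y ∈ f r, y ∈ S) (h : Reach f a x) : x ∈ S := by
  induction h with
  | refl => exact ha
  | tail _ hm ih => exact hc _ ih _ hm

-- the built defaultdict graph of A also looks up to nbr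
theorem buildGraphA_getD (rooms : List (List Int)) (r : Int) :
    (buildGraphA rooms).getD r [] = nbr rooms r := by
  suffices h : ∀ (k : Nat), k ≤ rooms.length → ∀ r : Int,
      ((PySem.List.pyRange 0 (k : Int) 1).foldl
        (fun g room => g.insert room (g.getD room [] ++ PySem.List.pyGetD rooms room []))
        PySem.Dict.empty).getD r []
      = (if 0 ≤ r ∧ r < (k : Int) then rooms.getD r.toNat [] else []) by
    have := h rooms.length le_rfl r
    simpa [buildGraphA, nbr] using this
  intro k
  induction k with
  | zero => intro _ r; simp [PySem.List.pyRange_one_eq_nil, PySem.Dict.getD_empty]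
  | succ k ih =>
    intro hk r
    have hrange : PySem.List.pyRange 0 ((k : Int) + 1) 1
        = PySem.List.pyRange 0 (k : Int) 1 ++ [(k : Int)] := by
      exact PySem.List.pyRange_one_succ_right (by omega)
    have hcast : ((k + 1 : Nat) : Int) = (k : Int) + 1 := by push_cast; ring
    rw [hcast, hrange, List.foldl_append]
    simp only [List.foldl_cons, List.foldl_nil]
    rw [PySem.Dict.getD_insert]
    rcases Nat.lt_or_ge k rooms.length with hlt | hge
    · rw [ih (by omega)]
      by_cases hrk : r = (k : Int)
      · subst hrk
        rw [PySem.List.pyGetD_of_nonneg rooms ([] : List Int) (by omega)]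
        simp
      · simp only [if_neg hrk]
        rw [ih (by omega)]
        split_ifs with h1 h2 <;> first | rfl | omega
    · omega

-- ---- A-side ----
theorem foldl_mem_mono {step : PySem.Set Int → Int → PySem.Set Int}
    (hstep : ∀ (s : PySem.Set Int) (a x : Int), x ∈ s → x ∈ step s a) :
    ∀ (l : List Int) (s : PySem.Set Int) (x : Int), x ∈ s → x ∈ l.foldl step s := by
  intro l
  induction l with
  | nil => intro s x hx; simpa using hx
  | cons a t ih => intro s x hx; exact ih (step s a) x (hstep s a x hx)

theorem dfsA_mono (rooms : List (List Int)) :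
    ∀ (fuel : Nat) (seen : PySem.Set Int) (room x : Int),
      x ∈ seen → x ∈ dfsA (buildGraphA rooms) fuel seen room := by
  intro fuel
  induction fuel with
  | zero => intro seen room x hx; simpa [dfsA] using hx
  | succ fuel ih =>
    intro seen room x hx
    simp only [dfsA]
    split
    · exact hx
    · exact foldl_mem_mono (fun s a y hy => ih s a y hy) _ _ x
        ((PySem.Set.mem_add seen room x).mpr (Or.inl hx))

theorem dfsA_sound (rooms : List (List Int)) :
    ∀ (fuel : Nat) (seen : PySem.Set Int) (room x : Int),
      x ∈ dfsA (buildGraphA rooms) fuel seen room → x ∈ seen ∨ Reach (nbr rooms) room x := by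
  intro fuel
  induction fuel with
  | zero => intro seen room x hx; exact Or.inl (by simpa [dfsA] using hx)
  | succ fuel ih =>
    intro seen room x hx
    simp only [dfsA] at hx
    split at hx
    · exact Or.inl hx
    · have hfold : ∀ (l : List Int) (s : PySem.Set Int) (y : Int),
          y ∈ l.foldl (fun s n => dfsA (buildGraphA rooms) fuel s n) s →
          y ∈ s ∨ ∃ n ∈ l, Reach (nbr rooms) n y := by
        intro l
        induction l with
        | nil => intro s y hy; exact Or.inl (by simpa using hy)
        | cons a t iht =>
          intro s y hy
          rcases iht _ y hy with hy1 | ⟨n, hn, hr⟩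
          · rcases ih s a y hy1 with hy2 | hr
            · exact Or.inl hy2
            · exact Or.inr ⟨a, List.mem_cons_self, hr⟩
          · exact Or.inr ⟨n, List.mem_cons_of_mem a hn, hr⟩
      rcases hfold _ _ x hx with hy | ⟨n, hn, hr⟩
      · rcases (PySem.Set.mem_add seen room x).mp hy with h1 | h1
        · exact Or.inl h1
        · exact Or.inr (by rw [h1]; exact Reach.refl _)
      · rw [buildGraphA_getD rooms room] at hn
        exact Or.inr (Reach.head hn hr)

def ClosedE (rooms : List (List Int)) (S L : List Int) : Prop :=
  ∀ r ∈ S, ∀ x ∈ nbr rooms r, x ∈ S ∨ x ∈ L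

theorem dfsA_complete (rooms : List (List Int)) :
    ∀ (fuel : Nat) (seen : PySem.Set Int) (room : Int) (P : List Int),
      (UnivF rooms \ seen.toFinset).card < fuel → room ∈ UnivF rooms →
      ClosedE rooms seen (room :: P) →
      ClosedE rooms (dfsA (buildGraphA rooms) fuel seen room) P ∧
        room ∈ dfsA (buildGraphA rooms) fuel seen room := by
  intro fuel
  induction fuel with
  | zero => intro seen room P hcard; omega
  | succ fuel ih =>
    intro seen room P hcard hroom hcl
    simp only [dfsA]
    by_cases hc : PySem.Set.contains seen room = true
    · rw [if_pos hc]
      have hm : room ∈ seen := (PySem.Set.contains_iff seen room).mp hc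
      refine ⟨fun r hr x hx => ?_, hm⟩
      rcases hcl r hr x hx with h1 | h1
      · exact Or.inl h1
      · rcases List.mem_cons.mp h1 with h2 | h2
        · exact Or.inl (h2 ▸ hm)
        · exact Or.inr h2
    · rw [if_neg hc]
      have hnm : room ∉ seen := fun hm => hc ((PySem.Set.contains_iff seen room).mpr hm)
      have hadd : PySem.Set.add seen room = seen ++ [room] := PySem.Set.add_of_not_mem hnm
      have hsub : (PySem.Set.add seen room).toFinset = insert room seen.toFinset := by
        rw [hadd]; simp [List.toFinset_append]
      have hmemsd : room ∈ UnivF rooms \ seen.toFinset := by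
        simp [Finset.mem_sdiff, hroom, List.mem_toFinset, hnm]
      have hcard' : (UnivF rooms \ (PySem.Set.add seen room).toFinset).card < fuel := by
        rw [hsub, Finset.sdiff_insert]
        have := Finset.card_erase_of_mem hmemsd
        have hpos : 0 < (UnivF rooms \ seen.toFinset).card := Finset.card_pos.mpr ⟨room, hmemsd⟩
        omega
      have hfold : ∀ (l : List Int) (s : PySem.Set Int) (P : List Int),
          (UnivF rooms \ s.toFinset).card < fuel → (∀ n ∈ l, n ∈ UnivF rooms) →
          ClosedE rooms s (l ++ P) →
          ClosedE rooms (l.foldl (fun s n => dfsA (buildGraphA rooms) fuel s n) s) P := by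
        intro l
        induction l with
        | nil => intro s P hcd _ hcls; simpa using hcls
        | cons a t iht =>
          intro s P hcd hu hcls
          have h1 := ih s a (t ++ P) hcd (hu a List.mem_cons_self) hcls
          have hmono : ∀ x ∈ s, x ∈ dfsA (buildGraphA rooms) fuel s a :=
            fun x hx => dfsA_mono rooms fuel s a x hx
          have hcd' : (UnivF rooms \ (dfsA (buildGraphA rooms) fuel s a).toFinset).card < fuel := by
            have hss : s.toFinset ⊆ (dfsA (buildGraphA rooms) fuel s a).toFinset := by
              intro x hx
              simp only [List.mem_toFinset] at hx ⊢
              exact hmono x hx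
            exact lt_of_le_of_lt
              (Finset.card_le_card (Finset.sdiff_subset_sdiff (Finset.Subset.refl _) hss)) hcd
          exact iht _ P hcd' (fun n hn => hu n (List.mem_cons_of_mem a hn)) h1.1
      have hclnew : ClosedE rooms (PySem.Set.add seen room)
          ((buildGraphA rooms).getD room [] ++ P) := by
        intro r hr x hx
        rcases (PySem.Set.mem_add seen room r).mp hr with h1 | h1
        · rcases hcl r h1 x hx with h2 | h2
          · exact Or.inl ((PySem.Set.mem_add seen room x).mpr (Or.inl h2))
          · rcases List.mem_cons.mp h2 with h3 | h3
            · exact Or.inl ((PySem.Set.mem_add seen room x).mpr (Or.inr h3))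
            · exact Or.inr (List.mem_append_right _ h3)
        · subst h1
          rw [buildGraphA_getD rooms r] at *
          exact Or.inr (List.mem_append_left _ hx)
      refine ⟨hfold _ _ P hcard'
        (fun n hn => nbr_subset_univ rooms room n (by rwa [buildGraphA_getD rooms room] at hn))
        hclnew, ?_⟩
      exact foldl_mem_mono (fun s a y hy => dfsA_mono rooms fuel s a y hy) _ _ room
        ((PySem.Set.mem_add seen room room).mpr (Or.inr rfl))

theorem dfsA_nodup (rooms : List (List Int)) :
    ∀ (fuel : Nat) (seen : PySem.Set Int) (room : Int),
      seen.Nodup → (dfsA (buildGraphA rooms) fuel seen room).Nodup := by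
  intro fuel
  induction fuel with
  | zero => intro seen room h; simpa [dfsA] using h
  | succ fuel ih =>
    intro seen room h
    simp only [dfsA]
    split
    · exact h
    · have hfold : ∀ (l : List Int) (s : PySem.Set Int), s.Nodup →
          (l.foldl (fun s n => dfsA (buildGraphA rooms) fuel s n) s).Nodup := by
        intro l
        induction l with
        | nil => intro s hs; simpa using hs
        | cons a t iht => intro s hs; exact iht _ (ih s a hs)
      exact hfold _ _ (PySem.Set.nodup_add seen room h)

-- ---- B-side: facts about the inner 'for key in …' fold ----
theorem bfsF_mono_seen : ∀ (keys : List Int) (s : PySem.Set Int) (q : List Int) (x : Int),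
    x ∈ s → x ∈ (keys.foldl bfsKey (s, q)).1 := by
  intro keys
  induction keys with
  | nil => intro s q x hx; simpa using hx
  | cons a t ih =>
    intro s q x hx
    simp only [List.foldl_cons]
    by_cases hc : a ∈ s
    · rw [bfsKey_pos s q a hc]; exact ih s q x hx
    · rw [bfsKey_neg s q a hc]
      exact ih _ _ x ((PySem.Set.mem_add s a x).mpr (Or.inl hx))

theorem bfsF_mono_queue : ∀ (keys : List Int) (s : PySem.Set Int) (q : List Int) (n : Int),
    n ∈ q → n ∈ (keys.foldl bfsKey (s, q)).2 := by
  intro keys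
  induction keys with
  | nil => intro s q n hn; simpa using hn
  | cons a t ih =>
    intro s q n hn
    simp only [List.foldl_cons]
    by_cases hc : a ∈ s
    · rw [bfsKey_pos s q a hc]; exact ih s q n hn
    · rw [bfsKey_neg s q a hc]
      exact ih _ _ n (List.mem_append_left _ hn)

theorem bfsF_sound_seen : ∀ (keys : List Int) (s : PySem.Set Int) (q : List Int) (x : Int),
    x ∈ (keys.foldl bfsKey (s, q)).1 → x ∈ s ∨ x ∈ keys := by
  intro keys
  induction keys with
  | nil => intro s q x hx; exact Or.inl (by simpa using hx)
  | cons a t ih =>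
    intro s q x hx
    simp only [List.foldl_cons] at hx
    by_cases hc : a ∈ s
    · rw [bfsKey_pos s q a hc] at hx
      exact (ih s q x hx).imp id (List.mem_cons_of_mem a)
    · rw [bfsKey_neg s q a hc] at hx
      rcases ih _ _ x hx with h1 | h1
      · rcases (PySem.Set.mem_add s a x).mp h1 with h2 | h2
        · exact Or.inl h2
        · exact Or.inr (h2 ▸ List.mem_cons_self)
      · exact Or.inr (List.mem_cons_of_mem a h1)

theorem bfsF_sound_queue : ∀ (keys : List Int) (s : PySem.Set Int) (q : List Int) (n : Int),
    n ∈ (keys.foldl bfsKey (s, q)).2 → n ∈ q ∨ n ∈ keys := by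
  intro keys
  induction keys with
  | nil => intro s q n hn; exact Or.inl (by simpa using hn)
  | cons a t ih =>
    intro s q n hn
    simp only [List.foldl_cons] at hn
    by_cases hc : a ∈ s
    · rw [bfsKey_pos s q a hc] at hn
      exact (ih s q n hn).imp id (List.mem_cons_of_mem a)
    · rw [bfsKey_neg s q a hc] at hn
      rcases ih _ _ n hn with h1 | h1
      · rcases List.mem_append.mp h1 with h2 | h2
        · exact Or.inl h2
        · exact Or.inr ((List.mem_singleton.mp h2) ▸ List.mem_cons_self)
      · exact Or.inr (List.mem_cons_of_mem a h1)

-- every key of the processed list ends up seen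
theorem bfsF_keys_seen : ∀ (keys : List Int) (s : PySem.Set Int) (q : List Int) (k : Int),
    k ∈ keys → k ∈ (keys.foldl bfsKey (s, q)).1 := by
  intro keys
  induction keys with
  | nil => intro s q k hk; simp at hk
  | cons a t ih =>
    intro s q k hk
    simp only [List.foldl_cons]
    by_cases hc : a ∈ s
    · rw [bfsKey_pos s q a hc]
      rcases List.mem_cons.mp hk with h1 | h1
      · exact bfsF_mono_seen t s q k (h1 ▸ hc)
      · exact ih s q k h1
    · rw [bfsKey_neg s q a hc]
      rcases List.mem_cons.mp hk with h1 | h1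
      · exact bfsF_mono_seen t _ _ k ((PySem.Set.mem_add s a k).mpr (Or.inr h1))
      · exact ih _ _ k h1

theorem bfsF_nodup : ∀ (keys : List Int) (s : PySem.Set Int) (q : List Int),
    s.Nodup → (keys.foldl bfsKey (s, q)).1.Nodup := by
  intro keys
  induction keys with
  | nil => intro s q h; simpa using h
  | cons a t ih =>
    intro s q h
    simp only [List.foldl_cons]
    by_cases hc : a ∈ s
    · rw [bfsKey_pos s q a hc]; exact ih s q h
    · rw [bfsKey_neg s q a hc]
      exact ih _ _ (PySem.Set.nodup_add s a h)

-- ---- B-side: the while loop ----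
theorem bfsLoop_sound (rooms : List (List Int)) :
    ∀ (seen : PySem.Set Int) (queue : List Int) (x : Int),
      x ∈ bfsLoop rooms seen queue → x ∈ seen ∨ ∃ n ∈ queue, Reach (nbr rooms) n x := by
  intro seen queue
  induction seen, queue using bfsLoop.induct rooms with
  | case1 seen => intro x hx; exact Or.inl (by simpa [bfsLoop] using hx)
  | case2 seen room rest ih =>
    intro x hx
    rw [bfsLoop] at hx
    rcases ih x hx with h1 | ⟨n, hn, hr⟩
    · rcases bfsF_sound_seen _ _ _ x h1 with h2 | h2
      · exact Or.inl h2
      · rw [graphB_getD rooms room] at h2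
        exact Or.inr ⟨room, List.mem_cons_self, Reach.tail (Reach.refl room) h2⟩
    · rcases bfsF_sound_queue _ _ _ n hn with h2 | h2
      · exact Or.inr ⟨n, List.mem_cons_of_mem room h2, hr⟩
      · rw [graphB_getD rooms room] at h2
        exact Or.inr ⟨room, List.mem_cons_self, Reach.head h2 hr⟩

-- every key processed by the inner loop is already seen or lands on the new queue
theorem bfsF_keys_covered : ∀ (keys : List Int) (s : PySem.Set Int) (q : List Int) (k : Int),
    k ∈ keys → k ∈ s ∨ k ∈ (keys.foldl bfsKey (s, q)).2 := by
  intro keys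
  induction keys with
  | nil => intro s q k hk; simp at hk
  | cons a t ih =>
    intro s q k hk
    simp only [List.foldl_cons]
    by_cases hc : a ∈ s
    · rw [bfsKey_pos s q a hc]
      rcases List.mem_cons.mp hk with h1 | h1
      · exact Or.inl (h1 ▸ hc)
      · exact ih s q k h1
    · rw [bfsKey_neg s q a hc]
      rcases List.mem_cons.mp hk with h1 | h1
      · exact Or.inr (bfsF_mono_queue t _ _ k
          (List.mem_append_right _ (by simp [h1])))
      · rcases ih (PySem.Set.add s a) (q ++ [a]) k h1 with h2 | h2
        · rcases (PySem.Set.mem_add s a k).mp h2 with h3 | h3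
          · exact Or.inl h3
          · exact Or.inr (bfsF_mono_queue t _ _ k
              (List.mem_append_right _ (by simp [h3])))
        · exact Or.inr h2

def InvB (rooms : List (List Int)) (seen : PySem.Set Int) (queue : List Int) : Prop :=
  (∀ n ∈ queue, n ∈ seen) ∧
    (∀ r ∈ seen, r ∈ queue ∨ ∀ k ∈ nbr rooms r, k ∈ seen)

theorem bfsLoop_complete (rooms : List (List Int)) :
    ∀ (seen : PySem.Set Int) (queue : List Int),
      InvB rooms seen queue →
      (∀ r ∈ bfsLoop rooms seen queue, ∀ k ∈ nbr rooms r, k ∈ bfsLoop rooms seen queue) ∧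
        (∀ x ∈ seen, x ∈ bfsLoop rooms seen queue) := by
  intro seen queue
  induction seen, queue using bfsLoop.induct rooms with
  | case1 seen =>
    intro hinv
    rw [bfsLoop]
    refine ⟨fun r hr k hk => ?_, fun x hx => hx⟩
    rcases hinv.2 r hr with h1 | h1
    · simp at h1
    · exact h1 k hk
  | case2 seen room rest ih =>
    intro hinv
    rw [bfsLoop]
    have hkeys : (graphB rooms).getD room [] = nbr rooms room := graphB_getD rooms room
    have hinv' : InvB rooms (((graphB rooms).getD room []).foldl bfsKey (seen, rest)).1
        (((graphB rooms).getD room []).foldl bfsKey (seen, rest)).2 := by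
      constructor
      · intro n hn
        rcases bfsF_sound_queue _ _ _ n hn with h1 | h1
        · exact bfsF_mono_seen _ _ _ n (hinv.1 n (List.mem_cons_of_mem room h1))
        · exact bfsF_keys_seen _ _ _ n h1
      · intro r hr
        have hfromseen : r ∈ seen →
            r ∈ (((graphB rooms).getD room []).foldl bfsKey (seen, rest)).2 ∨
              ∀ k ∈ nbr rooms r,
                k ∈ (((graphB rooms).getD room []).foldl bfsKey (seen, rest)).1 := by
          intro h1
          rcases hinv.2 r h1 with h2 | h2
          · rcases List.mem_cons.mp h2 with h3 | h3
            · subst h3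
              exact Or.inr (fun k hk => bfsF_keys_seen _ _ _ k (by rwa [hkeys]))
            · exact Or.inl (bfsF_mono_queue _ _ _ r h3)
          · exact Or.inr (fun k hk => bfsF_mono_seen _ _ _ k (h2 k hk))
        rcases bfsF_sound_seen _ _ _ r hr with h1 | h1
        · exact hfromseen h1
        · rcases bfsF_keys_covered _ seen rest r h1 with h2 | h2
          · exact hfromseen h2
          · exact Or.inl h2
    obtain ⟨hC, hS⟩ := ih hinv'
    exact ⟨hC, fun x hx => hS x (bfsF_mono_seen _ _ _ x hx)⟩

theorem bfsLoop_nodup (rooms : List (List Int)) :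
    ∀ (seen : PySem.Set Int) (queue : List Int),
      seen.Nodup → (bfsLoop rooms seen queue).Nodup := by
  intro seen queue
  induction seen, queue using bfsLoop.induct rooms with
  | case1 seen => intro h; simpa [bfsLoop] using h
  | case2 seen room rest ih =>
    intro h
    rw [bfsLoop]
    exact ih (bfsF_nodup _ _ _ h)

-- ---- the two result sets agree ----
theorem seen_sets_agree (rooms : List (List Int)) (x : Int) :
    (x ∈ dfsA (buildGraphA rooms) (rooms.flatten.length + 2) PySem.Set.empty 0 ↔
      x ∈ bfsLoop rooms (PySem.Set.ofList [0]) [0]) := by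
  have h0univ : (0 : Int) ∈ UnivF rooms := Finset.mem_insert_self 0 _
  have hcard : (UnivF rooms \ (PySem.Set.empty : PySem.Set Int).toFinset).card
      < rooms.flatten.length + 2 := by
    have h1 : (UnivF rooms).card ≤ rooms.flatten.toFinset.card + 1 := Finset.card_insert_le _ _
    have h2 : rooms.flatten.toFinset.card ≤ rooms.flatten.length := rooms.flatten.toFinset_card_le
    have h3 : (UnivF rooms \ (PySem.Set.empty : PySem.Set Int).toFinset).card ≤ (UnivF rooms).card :=
      Finset.card_le_card (Finset.sdiff_subset)
    omega
  obtain ⟨hCA, h0A⟩ := dfsA_complete rooms (rooms.flatten.length + 2) PySem.Set.empty 0 []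
    hcard h0univ (fun r hr => by simp [PySem.Set.empty] at hr)
  have hclA : ∀ r ∈ dfsA (buildGraphA rooms) (rooms.flatten.length + 2) PySem.Set.empty 0,
      ∀ y ∈ nbr rooms r, y ∈ dfsA (buildGraphA rooms) (rooms.flatten.length + 2) PySem.Set.empty 0 :=
    fun r hr y hy => (hCA r hr y hy).resolve_right (by simp)
  have hinv0 : InvB rooms (PySem.Set.ofList [0]) [0] := by
    constructor
    · intro n hn
      rw [PySem.Set.mem_ofList]
      simpa using hn
    · intro r hr
      rw [PySem.Set.mem_ofList] at hr
      exact Or.inl (by simpa using hr)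
  obtain ⟨hCB, hSB⟩ := bfsLoop_complete rooms (PySem.Set.ofList [0]) [0] hinv0
  have h0B : (0 : Int) ∈ bfsLoop rooms (PySem.Set.ofList [0]) [0] :=
    hSB 0 ((PySem.Set.mem_ofList _ _).mpr (List.mem_singleton_self 0))
  constructor
  · intro hx
    rcases dfsA_sound rooms _ _ _ x hx with h1 | h1
    · simp [PySem.Set.empty] at h1
    · exact reach_subset_closed h0B hCB h1
  · intro hx
    rcases bfsLoop_sound rooms _ _ x hx with h1 | ⟨n, hn, hr⟩
    · rw [PySem.Set.mem_ofList] at h1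
      have hx0 : x = 0 := by simpa using h1
      exact hx0 ▸ h0A
    · have hn0 : n = 0 := by simpa using hn
      exact reach_subset_closed h0A hclA (hn0 ▸ hr)

-- ===== VERDICT (by name: the statement is the Claim_ definition above) =====
theorem canVisitAllRooms_dfs_spec : Claim_equal_canVisitAllRooms_dfs := by
  intro rooms _ hpre
  unfold Spec_canVisitAllRooms_dfs canVisitAllRooms_dfs canVisitAllRooms_dfs_alt
  have hlen : (dfsA (buildGraphA rooms) (rooms.flatten.length + 2) PySem.Set.empty 0).length
      = (bfsLoop rooms (PySem.Set.ofList [0]) [0]).length := by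
    refine List.Perm.length_eq ?_
    refine (List.perm_ext_iff_of_nodup ?_ ?_).mpr (fun a => seen_sets_agree rooms a)
    · exact dfsA_nodup rooms _ _ _ List.nodup_nil
    · exact bfsLoop_nodup rooms _ _ (PySem.Set.nodup_ofList _)
  match rooms, hpre with
  | a :: t, _ =>
    have hget : PySem.List.pyGet? (a :: t) 0 = some a := by
      simp [PySem.List.pyGet?, PySem.List.pyIdx?]
    rw [hget]
    simp only [PySem.Set.len, hlen]
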